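-- pv_equiv track=rewrite | github.com/qadeeradil14-alt/meetingmeter | api/calendar-events.py | _field_with_params
-- ===== SOURCE A (Python) =====
-- def _field_with_params(text, name):
--     """Return (params_string, value_string) for an ICS field, respecting line folding."""
--     lines = text.splitlines()
--     unfolded = []
--     for line in lines:
--         if line and line[0] in (" ", "\t") and unfolded:
--             unfolded[-1] += line[1:]
--         else:
--             unfolded.append(line)
--     for line in unfolded:
--         if line.startswith(name + ":") or line.startswith(name + ";"):
--             colon = line.find(":")
--             if colon == -1:
--                 return "", ""
--             return line[:colon], line[colon + 1:].strip()
--     return "", ""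
-- ===== SOURCE B (Python) =====
-- def _split_colon(line):
--     colon = line.find(":")
--     if colon == -1:
--         return "", ""
--     return line[:colon], line[colon + 1:].strip()
--
--
-- def _field_with_params(text, name):
--     """Single pass: stream physical lines, keeping only the current logical line."""
--     pc = name + ":"
--     ps = name + ";"
--     cur = None
--     for line in text.splitlines():
--         if cur is not None and line and line[0] in (" ", "\t"):
--             cur += line[1:]
--             continue
--         if cur is not None and (cur.startswith(pc) or cur.startswith(ps)):
--             return _split_colon(cur)
--         cur = line
--     if cur is not None and (cur.startswith(pc) or cur.startswith(ps)):
--         return _split_colon(cur)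
--     return "", ""
-- ===== Notes on version B (the rewrite author's own statement) =====
-- stated objective: alternative
-- what changed: B streams the physical lines in a single pass keeping only the current logical line (and returns as soon as the matching logical line is complete), instead of first materialising the whole unfolded list and then scanning it in a second loop.
import Mathlib
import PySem

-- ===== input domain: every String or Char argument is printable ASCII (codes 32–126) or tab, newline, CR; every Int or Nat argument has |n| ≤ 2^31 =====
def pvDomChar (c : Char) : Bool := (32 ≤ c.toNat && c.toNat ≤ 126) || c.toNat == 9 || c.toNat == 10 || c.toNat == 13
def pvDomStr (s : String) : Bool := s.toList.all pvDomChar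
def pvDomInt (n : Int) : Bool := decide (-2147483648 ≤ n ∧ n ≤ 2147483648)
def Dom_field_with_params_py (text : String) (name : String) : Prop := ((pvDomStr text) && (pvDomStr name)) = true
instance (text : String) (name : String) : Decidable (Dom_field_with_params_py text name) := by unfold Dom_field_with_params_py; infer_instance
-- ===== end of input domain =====

-- B streams the physical lines once, keeping only the current logical line, instead of
-- materialising the whole unfolded list and scanning it a second time (objective: alternative).

-- ===== PORT A =====
-- second loop of A: scan the unfolded logical lines for the first match
def aScanLoop (name : String) : List String → String × String
  | [] => ("", "")
  | line :: rest =>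
    if PySem.Str.startswith line (name ++ ":") || PySem.Str.startswith line (name ++ ";") then
      let colon := PySem.Str.find line ":"
      if colon = -1 then ("", "")
      else (PySem.Str.slice line none (some colon),
            PySem.Str.strip (PySem.Str.slice line (some (colon + 1)) none))
    else aScanLoop name rest

def field_with_params_py (text : String) (name : String) : String × String :=
  let lines := PySem.Str.splitlines text
  let unfolded := lines.foldl (fun unfolded line =>
    if line ≠ "" ∧ (PySem.Str.pyGet? line 0 = some ' ' ∨ PySem.Str.pyGet? line 0 = some '\t')
        ∧ unfolded ≠ [] then
      unfolded.dropLast ++ [unfolded.getLast! ++ PySem.Str.slice line (some 1) none]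
    else unfolded ++ [line]) []
  aScanLoop name unfolded

-- ===== PORT B =====
def bSplitColon (line : String) : String × String :=
  let colon := PySem.Str.find line ":"
  if colon = -1 then ("", "")
  else (PySem.Str.slice line none (some colon),
        PySem.Str.strip (PySem.Str.slice line (some (colon + 1)) none))

-- B's single loop: cur is the currently open logical line (none before the first line)
def bLoop (pc ps : String) (cur : Option String) : List String → String × String
  | [] =>
    match cur with
    | some c =>
      if PySem.Str.startswith c pc || PySem.Str.startswith c ps then bSplitColon c else ("", "")
    | none => ("", "")
  | line :: rest =>
    match cur with
    | some c =>
      if line ≠ "" ∧ (PySem.Str.pyGet? line 0 = some ' ' ∨ PySem.Str.pyGet? line 0 = some '\t') then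
        bLoop pc ps (some (c ++ PySem.Str.slice line (some 1) none)) rest
      else if PySem.Str.startswith c pc || PySem.Str.startswith c ps then bSplitColon c
      else bLoop pc ps (some line) rest
    | none => bLoop pc ps (some line) rest

def field_with_params_py_alt (text : String) (name : String) : String × String :=
  bLoop (name ++ ":") (name ++ ";") none (PySem.Str.splitlines text)

-- ===== PRECONDITION & SPEC =====
def Spec_field_with_params_py (text : String) (name : String) (out : String × String) : Prop := out = field_with_params_py_alt text name
instance (text : String) (name : String) (out : String × String) : Decidable (Spec_field_with_params_py text name out) := by unfold Spec_field_with_params_py; infer_instance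

-- ===== CLAIM (what is proved, stated in full; the proofs are below) =====
def Claim_equal_field_with_params_py : Prop := ∀ (text : String) (name : String), Dom_field_with_params_py text name → Spec_field_with_params_py text name (field_with_params_py text name)

-- ===== LEMMAS AND PROOFS =====

theorem pvGetLast!_concat (acc : List String) (c : String) : (acc ++ [c]).getLast! = c := by
  unfold List.getLast!
  cases h : acc ++ [c] with
  | nil => simp at h
  | cons b bs =>
    have hg : (acc ++ [c]).getLast (by simp) = c := List.getLast_append_singleton _
    simp only [h] at hg ⊢
    exact hg

-- the logical-line grouping that A's fold computes
def pvGrp (c : String) : List String → List String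
  | [] => [c]
  | l :: ls =>
    if l ≠ "" ∧ (PySem.Str.pyGet? l 0 = some ' ' ∨ PySem.Str.pyGet? l 0 = some '\t') then
      pvGrp (c ++ PySem.Str.slice l (some 1) none) ls
    else c :: pvGrp l ls

theorem pvFoldl_eq_grp (ls : List String) : ∀ (acc : List String) (c : String),
    ls.foldl (fun unfolded line =>
      if line ≠ "" ∧ (PySem.Str.pyGet? line 0 = some ' ' ∨ PySem.Str.pyGet? line 0 = some '\t')
          ∧ unfolded ≠ [] then
        unfolded.dropLast ++ [unfolded.getLast! ++ PySem.Str.slice line (some 1) none]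
      else unfolded ++ [line]) (acc ++ [c]) = acc ++ pvGrp c ls := by
  induction ls with
  | nil => intro acc c; simp [pvGrp]
  | cons l ls ih =>
    intro acc c
    by_cases h : l ≠ "" ∧ (PySem.Str.pyGet? l 0 = some ' ' ∨ PySem.Str.pyGet? l 0 = some '\t')
    · simp only [List.foldl_cons, pvGrp, h, and_true, if_pos,
        List.append_ne_nil_of_right_ne_nil, ne_eq, List.cons_ne_self, not_false_eq_true]
      rw [List.dropLast_concat, pvGetLast!_concat]
      exact ih acc (c ++ PySem.Str.slice l (some 1) none)
    · simp only [List.foldl_cons, pvGrp, if_neg h]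
      rw [if_neg (by tauto)]
      have := ih (acc ++ [c]) l
      simpa using this

theorem pvBLoop_eq_scan (name : String) (ls : List String) : ∀ (c : String),
    bLoop (name ++ ":") (name ++ ";") (some c) ls = aScanLoop name (pvGrp c ls) := by
  induction ls with
  | nil =>
    intro c
    simp only [bLoop, pvGrp, aScanLoop, bSplitColon]
  | cons l ls ih =>
    intro c
    by_cases h : l ≠ "" ∧ (PySem.Str.pyGet? l 0 = some ' ' ∨ PySem.Str.pyGet? l 0 = some '\t')
    · simp only [bLoop, pvGrp, if_pos h]
      exact ih (c ++ PySem.Str.slice l (some 1) none)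
    · simp only [bLoop, pvGrp, aScanLoop, if_neg h, bSplitColon]
      split_ifs with hm
      all_goals first | rfl | exact ih l

-- ===== VERDICT (by name: the statement is the Claim_ definition above) =====
theorem field_with_params_py_spec : Claim_equal_field_with_params_py := by
  intro text name _
  unfold Spec_field_with_params_py field_with_params_py field_with_params_py_alt
  cases hls : PySem.Str.splitlines text with
  | nil => simp [aScanLoop, bLoop]
  | cons l ls =>
    simp only [List.foldl_cons]
    rw [if_neg (by tauto)]
    rw [show ([] : List String) ++ [l] = [] ++ [l] from rfl, pvFoldl_eq_grp ls [] l]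
    simp only [List.nil_append, bLoop]
    exact (pvBLoop_eq_scan name ls l).symm
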